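-- pv_equiv track=rewrite | github.com/ahmadfarhanstwn/myleetcodejourney | 915_PartitionArray.py | partitionDisjoint
-- ===== SOURCE A (Python) =====
-- from typing import List
--
-- def partitionDisjoint(nums: List[int]) -> int:
--     output = 0
--     v = nums[output]
--     maxim = v
--     for i in range(len(nums)):
--         maxim = max(maxim,nums[i])
--         if nums[i] < v:
--             output = i
--             v = maxim
--     return output+1
-- ===== SOURCE B (Python) =====
-- from typing import List
--
-- def partitionDisjoint(nums: List[int]) -> int:
--     # rightMin[i] = min(nums[i:]); then one forward scan with a running prefix max,
--     # returning the first split length k = i+1 with max(nums[:k]) <= min(nums[k:]).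
--     rightMin = []
--     for x in reversed(nums):
--         rightMin.append(min(x, rightMin[-1]) if rightMin else x)
--     rightMin.reverse()
--     leftMax = None
--     for i in range(len(nums) - 1):
--         leftMax = nums[i] if leftMax is None else max(leftMax, nums[i])
--         if leftMax <= rightMin[i + 1]:
--             return i + 1
--     return len(nums)
-- ===== Notes on version B (the rewrite author's own statement) =====
-- stated objective: alternative
-- what changed: Replaces A's single-pass rolling (candidate index, boundary max) update with a suffix-minimum table built backward plus a forward prefix-max scan that returns at the first index where prefix max <= suffix min.
import Mathlib
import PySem

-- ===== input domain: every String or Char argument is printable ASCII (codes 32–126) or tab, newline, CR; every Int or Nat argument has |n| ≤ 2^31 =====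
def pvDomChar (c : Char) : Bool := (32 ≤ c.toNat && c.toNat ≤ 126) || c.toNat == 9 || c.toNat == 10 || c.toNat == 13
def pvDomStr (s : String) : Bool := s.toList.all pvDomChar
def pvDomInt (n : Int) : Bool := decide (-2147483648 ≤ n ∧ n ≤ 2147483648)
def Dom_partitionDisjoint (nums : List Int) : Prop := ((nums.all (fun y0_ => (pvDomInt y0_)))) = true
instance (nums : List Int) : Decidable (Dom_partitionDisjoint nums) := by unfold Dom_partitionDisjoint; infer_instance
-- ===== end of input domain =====

-- B replaces A's rolling (candidate index, boundary max) update with a suffix-min table plus a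
-- forward prefix-max scan (alternative decomposition, same O(n) cost, O(n) space).

-- ===== PORT A =====
-- loop body of A: maxim = max(maxim, nums[i]); if nums[i] < v: output = i; v = maxim
def pvStepA (nums : List Int) (st : Nat × Int × Int) (i : Nat) : Nat × Int × Int :=
  let x := nums.getD i 0              -- nums[i], i ∈ range(len(nums)) so always in range
  let maxim := max st.2.2 x
  if x < st.2.1 then (i, maxim, maxim) else (st.1, st.2.1, maxim)

def partitionDisjoint (nums : List Int) : Int :=
  match nums with
  | [] => 0                           -- Python raises IndexError on nums[0]; excluded by Pre_
  | v0 :: _ =>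
    let st := (List.range nums.length).foldl (pvStepA nums) (0, v0, v0)
    Int.ofNat st.1 + 1

-- ===== PORT B =====
-- rightMin built backward: pvSuffixMins nums[i] = min(nums[i:])
def pvSuffixMins : List Int → List Int
  | [] => []
  | x :: xs =>
    match pvSuffixMins xs with
    | [] => [x]
    | m :: ms => min x m :: m :: ms

-- forward scan over pairs (nums[i], rightMin[i+1]) carrying the running prefix max
def pvFindSplit (n : Int) : List (Int × Int) → Option Int → Int → Int
  | [], _, _ => n
  | (x, r) :: rest, lmOpt, i =>
    let lm := match lmOpt with | none => x | some m => max m x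
    if lm ≤ r then i + 1 else pvFindSplit n rest (some lm) (i + 1)

def partitionDisjoint_alt (nums : List Int) : Int :=
  pvFindSplit (Int.ofNat nums.length)
    (nums.zip ((pvSuffixMins nums).drop 1)) none 0

-- ===== PRECONDITION & SPEC =====
-- Pre_ excludes only the empty list, on which Python A raises IndexError.
def Pre_partitionDisjoint (nums : List Int) : Prop := nums ≠ []
instance (nums : List Int) : Decidable (Pre_partitionDisjoint nums) := by
  unfold Pre_partitionDisjoint; infer_instance
def pvWitness_partitionDisjoint : List Int := [5, 0, 3, 8, 6]

def Spec_partitionDisjoint (nums : List Int) (out : Int) : Prop := out = partitionDisjoint_alt nums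
instance (nums : List Int) (out : Int) : Decidable (Spec_partitionDisjoint nums out) := by
  unfold Spec_partitionDisjoint; infer_instance

-- ===== CLAIM (what is proved, stated in full; the proofs are below) =====
def Claim_equal_partitionDisjoint : Prop := ∀ (nums : List Int), Dom_partitionDisjoint nums → Pre_partitionDisjoint nums → Spec_partitionDisjoint nums (partitionDisjoint nums)

-- ===== LEMMAS AND PROOFS =====

-- a split at k (1 ≤ k ≤ n) is valid: every element strictly left of k ≤ every element from k on
def pvGoodSplit (nums : List Int) (k : Nat) : Prop :=
  ∀ i j : Nat, i < k → k ≤ j → j < nums.length → nums.getD i 0 ≤ nums.getD j 0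

lemma pvSuffixMins_length (xs : List Int) : (pvSuffixMins xs).length = xs.length := by
  induction xs with
  | nil => rfl
  | cons x xs ih =>
    simp only [pvSuffixMins]
    cases h : pvSuffixMins xs with
    | nil => rw [h] at ih; simp [← ih]
    | cons m ms => rw [h] at ih; simp [← ih]

lemma pvSuffixMins_char : ∀ (xs : List Int) (i : Nat), i < xs.length →
    (∀ b, i ≤ b → b < xs.length → (pvSuffixMins xs).getD i 0 ≤ xs.getD b 0) ∧
    (∃ b, i ≤ b ∧ b < xs.length ∧ xs.getD b 0 = (pvSuffixMins xs).getD i 0) := by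
  intro xs
  induction xs with
  | nil => intro i hi; simp at hi
  | cons x xs ih =>
    intro i hi
    cases h : pvSuffixMins xs with
    | nil =>
      have hx : xs = [] := by
        have := pvSuffixMins_length xs; rw [h] at this; exact List.length_eq_zero_iff.mp this.symm
      subst hx
      simp at hi; subst hi
      refine ⟨?_, 0, le_refl _, by simp, ?_⟩
      · intro b _ hb
        have hb0 : b = 0 := by simpa using hb
        subst hb0; simp [pvSuffixMins]
      · simp [pvSuffixMins]
    | cons m ms =>
      have hxs : 0 < xs.length := by
        have := pvSuffixMins_length xs; rw [h] at this; simp [← this]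
      have hm : (pvSuffixMins xs).getD 0 0 = m := by rw [h]; rfl
      cases i with
      | zero =>
        have ih0 := ih 0 hxs
        constructor
        · intro b _ hb
          have hsm : (pvSuffixMins (x :: xs)).getD 0 0 = min x m := by
            simp only [pvSuffixMins]; rw [h]; rfl
          rw [hsm]
          cases b with
          | zero => simp
          | succ b' =>
            have hb' : b' < xs.length := by simpa using hb
            have := ih0.1 0 (Nat.zero_le _) hxs  -- hmm wrong: need bound at b'
            have hble := ih0.1 b' (Nat.zero_le _) hb'
            rw [hm] at hble
            calc min x m ≤ m := min_le_right _ _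
              _ ≤ xs.getD b' 0 := hble
              _ = (x :: xs).getD (b' + 1) 0 := by simp
        · have hsm : (pvSuffixMins (x :: xs)).getD 0 0 = min x m := by
            simp only [pvSuffixMins]; rw [h]; rfl
          rcases le_total x m with hxm | hmx
          · exact ⟨0, le_refl _, by simp, by rw [List.getD_cons_zero, hsm, min_eq_left hxm]⟩
          · obtain ⟨b', _, hb', heq⟩ := (ih 0 hxs).2
            rw [hm] at heq
            exact ⟨b' + 1, Nat.zero_le _, by simpa using hb', by
              rw [List.getD_cons_succ, hsm, min_eq_right hmx, heq]⟩
      | succ i =>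
        have hi' : i < xs.length := by simpa using hi
        have hsm : (pvSuffixMins (x :: xs)).getD (i + 1) 0 = (pvSuffixMins xs).getD i 0 := by
          simp only [pvSuffixMins]; rw [h]; simp
        obtain ⟨hle, b', hb'l, hb'r, heq⟩ := ih i hi'
        refine ⟨?_, b' + 1, by omega, by simpa using hb'r, by
          rw [List.getD_cons_succ, hsm, heq]⟩
        intro b hb1 hb2
        cases b with
        | zero => omega
        | succ b =>
          rw [hsm]
          simpa using hle b (by omega) (by simpa using hb2)

lemma pvFindSplit_char (nums : List Int) :
    ∀ (c i : Nat) (lmOpt : Option Int),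
    i + 1 + c = nums.length →
    ((lmOpt = none ∧ i = 0) ∨
      ∃ lm, lmOpt = some lm ∧ (∀ a, a < i → nums.getD a 0 ≤ lm) ∧ ∃ a, a < i ∧ nums.getD a 0 = lm) →
    (∀ k, 1 ≤ k → k ≤ i → ¬ pvGoodSplit nums k) →
    ∃ K : Nat,
      pvFindSplit (Int.ofNat nums.length)
          ((nums.drop i).zip ((pvSuffixMins nums).drop (i + 1))) lmOpt (Int.ofNat i)
        = Int.ofNat K ∧
      1 ≤ K ∧ K ≤ nums.length ∧ pvGoodSplit nums K ∧
      (∀ k, 1 ≤ k → k < K → ¬ pvGoodSplit nums k) := by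
  intro c
  induction c with
  | zero =>
    intro i lmOpt hlen _ hbad
    have hdrop : (pvSuffixMins nums).drop (i + 1) = [] := by
      apply List.drop_eq_nil_of_le; rw [pvSuffixMins_length]; omega
    rw [hdrop, List.zip_nil_right]
    refine ⟨nums.length, rfl, by omega, le_refl _, ?_, ?_⟩
    · intro a b _ hb1 hb2; omega
    · intro k hk1 hk2; exact hbad k hk1 (by omega)
  | succ c ih =>
    intro i lmOpt hlen hlm hbad
    have hi1 : i < nums.length := by omega
    have hi2 : i + 1 < nums.length := by omega
    have hsl : i + 1 < (pvSuffixMins nums).length := by rw [pvSuffixMins_length]; omega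
    have hd1 : nums.drop i = nums.getD i 0 :: nums.drop (i + 1) := by
      rw [List.drop_eq_getElem_cons hi1, List.getD_eq_getElem _ _ hi1]
    have hd2 : (pvSuffixMins nums).drop (i + 1)
        = (pvSuffixMins nums).getD (i + 1) 0 :: (pvSuffixMins nums).drop (i + 2) := by
      rw [List.drop_eq_getElem_cons hsl, List.getD_eq_getElem _ _ hsl]
    obtain ⟨hrle, b0, hb0l, hb0r, hb0e⟩ := pvSuffixMins_char nums (i + 1) hi2
    -- shared continuation: the body after the running max has been updated to lm'
    have key : ∀ lm', (∀ a, a ≤ i → nums.getD a 0 ≤ lm') → (∃ a, a ≤ i ∧ nums.getD a 0 = lm') →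
        ∃ K : Nat,
          (if lm' ≤ (pvSuffixMins nums).getD (i + 1) 0 then Int.ofNat i + 1
            else pvFindSplit (Int.ofNat nums.length)
              ((nums.drop (i + 1)).zip ((pvSuffixMins nums).drop (i + 2))) (some lm')
              (Int.ofNat i + 1)) = Int.ofNat K ∧
          1 ≤ K ∧ K ≤ nums.length ∧ pvGoodSplit nums K ∧
          (∀ k, 1 ≤ k → k < K → ¬ pvGoodSplit nums k) := by
      intro lm' hlmle hex
      obtain ⟨a0, ha0, ha0e⟩ := hex
      by_cases hc : lm' ≤ (pvSuffixMins nums).getD (i + 1) 0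
      · rw [if_pos hc]
        refine ⟨i + 1, by simp, by omega, by omega, ?_, ?_⟩
        · intro a b ha hb1 hb2
          calc nums.getD a 0 ≤ lm' := hlmle a (by omega)
            _ ≤ (pvSuffixMins nums).getD (i + 1) 0 := hc
            _ ≤ nums.getD b 0 := hrle b hb1 hb2
        · intro k hk1 hk2; exact hbad k hk1 (by omega)
      · rw [if_neg hc]
        have hbadi1 : ¬ pvGoodSplit nums (i + 1) := by
          intro hg
          exact hc (by rw [← ha0e, ← hb0e]; exact hg a0 b0 (by omega) hb0l hb0r)
        have hrec := ih (i + 1) (some lm') (by omega)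
          (Or.inr ⟨lm', rfl, fun a ha => hlmle a (by omega), a0, by omega, ha0e⟩)
          (fun k hk1 hk2 => by
            rcases Nat.lt_or_ge k (i + 1) with h | h
            · exact hbad k hk1 (by omega)
            · have : k = i + 1 := by omega
              subst this; exact hbadi1)
        obtain ⟨K, hK, hrest⟩ := hrec
        refine ⟨K, ?_, hrest⟩
        rw [← hK]
        rw [show Int.ofNat i + 1 = Int.ofNat (i + 1) from rfl]
    rw [hd1, hd2, List.zip_cons_cons]
    rcases hlm with ⟨hnone, hi0⟩ | ⟨lm, hsome, hle, a0, ha0, ha0e⟩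
    · subst hnone; subst hi0
      simp only [pvFindSplit]
      exact key (nums.getD 0 0)
        (fun a ha => le_of_eq (by rw [Nat.le_zero.mp ha]))
        ⟨0, le_refl _, rfl⟩
    · subst hsome
      simp only [pvFindSplit]
      refine key (max lm (nums.getD i 0)) ?_ ?_
      · intro a ha
        rcases Nat.lt_or_ge a i with h | h
        · exact le_trans (hle a h) (le_max_left _ _)
        · have : a = i := by omega
          subst this; exact le_max_right _ _
      · rcases le_total lm (nums.getD i 0) with h | h
        · exact ⟨i, le_refl _, by rw [max_eq_right h]⟩
        · exact ⟨a0, by omega, by rw [max_eq_left h, ha0e]⟩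

lemma pvB_char (nums : List Int) (hne : nums ≠ []) :
    ∃ K : Nat, partitionDisjoint_alt nums = Int.ofNat K ∧
      1 ≤ K ∧ K ≤ nums.length ∧ pvGoodSplit nums K ∧
      (∀ k, 1 ≤ k → k < K → ¬ pvGoodSplit nums k) := by
  have hpos : 0 < nums.length := List.length_pos_of_ne_nil hne
  have h := pvFindSplit_char nums (nums.length - 1) 0 none (by omega)
    (Or.inl ⟨rfl, rfl⟩) (fun k hk1 hk2 => absurd hk1 (by omega))
  simp only [List.drop_zero] at h
  exact h

def pvInvA (nums : List Int) (m : Nat) (st : Nat × Int × Int) : Prop :=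
  st.1 < m ∧
  (∀ a, a < m → nums.getD a 0 ≤ st.2.2) ∧
  (∃ a, a < m ∧ nums.getD a 0 = st.2.2) ∧
  (∀ a, a ≤ st.1 → nums.getD a 0 ≤ st.2.1) ∧
  (∃ a, a ≤ st.1 ∧ nums.getD a 0 = st.2.1) ∧
  (∀ j, st.1 < j → j < m → st.2.1 ≤ nums.getD j 0) ∧
  (∀ k, 1 ≤ k → k ≤ st.1 → ∃ i j, i < k ∧ k ≤ j ∧ j < m ∧ nums.getD j 0 < nums.getD i 0)

lemma pvStepA_inv (nums : List Int) (m : Nat) (st : Nat × Int × Int)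
    (hinv : pvInvA nums m st) : pvInvA nums (m + 1) (pvStepA nums st m) := by
  obtain ⟨h1, hmax, ⟨am, ham, hame⟩, hvle, ⟨a1, ha1, ha1e⟩, hafter, hbadw⟩ := hinv
  have hmaxw : ∃ a, a < m + 1 ∧ nums.getD a 0 = max st.2.2 (nums.getD m 0) := by
    rcases le_total st.2.2 (nums.getD m 0) with h | h
    · exact ⟨m, by omega, by rw [max_eq_right h]⟩
    · exact ⟨am, by omega, by rw [max_eq_left h, hame]⟩
  unfold pvStepA
  by_cases hc : nums.getD m 0 < st.2.1
  · rw [if_pos hc]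
    refine ⟨by omega, ?_, hmaxw, ?_,
      (by obtain ⟨a, ha, hae⟩ := hmaxw; exact ⟨a, by omega, hae⟩), ?_, ?_⟩
    · intro a ha
      rcases Nat.lt_or_ge a m with h | h
      · exact le_trans (hmax a h) (le_max_left _ _)
      · have : a = m := by omega
        subst this; exact le_max_right _ _
    · intro a ha
      rcases Nat.lt_or_ge a m with h | h
      · exact le_trans (hmax a h) (le_max_left _ _)
      · have : a = m := by omega
        subst this; exact le_max_right _ _
    · intro j hj1 hj2; omega
    · intro k hk1 hk2
      rcases Nat.lt_or_ge st.1 k with h | h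
      · -- old output < k ≤ m : pair (a1, m)
        exact ⟨a1, m, by omega, by omega, by omega,
          lt_of_lt_of_le hc (by rw [← ha1e])⟩
      · obtain ⟨i, j, hij⟩ := hbadw k hk1 h
        exact ⟨i, j, hij.1, hij.2.1, by omega, hij.2.2.2⟩
  · rw [if_neg hc]
    refine ⟨by omega, ?_, hmaxw, hvle, ⟨a1, ha1, ha1e⟩, ?_, ?_⟩
    · intro a ha
      rcases Nat.lt_or_ge a m with h | h
      · exact le_trans (hmax a h) (le_max_left _ _)
      · have : a = m := by omega
        subst this; exact le_max_right _ _
    · intro j hj1 hj2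
      rcases Nat.lt_or_ge j m with h | h
      · exact hafter j hj1 h
      · have : j = m := by omega
        subst this; exact le_of_not_gt hc
    · intro k hk1 hk2
      obtain ⟨i, j, hij⟩ := hbadw k hk1 hk2
      exact ⟨i, j, hij.1, hij.2.1, by omega, hij.2.2.2⟩

lemma pvFoldA_inv (nums : List Int) :
    ∀ (c m : Nat) (st : Nat × Int × Int), m + c = nums.length → pvInvA nums m st →
    pvInvA nums nums.length ((List.range' m c).foldl (pvStepA nums) st) := by
  intro c
  induction c with
  | zero => intro m st hm hinv; simpa [show m = nums.length by omega] using hinv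
  | succ c ih =>
    intro m st hm hinv
    rw [List.range'_succ, List.foldl_cons]
    exact ih (m + 1) _ (by omega) (pvStepA_inv nums m st hinv)

lemma pvA_char (nums : List Int) (hne : nums ≠ []) :
    ∃ K : Nat, partitionDisjoint nums = Int.ofNat K ∧
      1 ≤ K ∧ K ≤ nums.length ∧ pvGoodSplit nums K ∧
      (∀ k, 1 ≤ k → k < K → ¬ pvGoodSplit nums k) := by
  obtain ⟨v0, rest, rfl⟩ := List.exists_cons_of_ne_nil hne
  have hlen : 1 ≤ (v0 :: rest).length := by simp
  have hst1 : pvStepA (v0 :: rest) (0, v0, v0) 0 = (0, v0, v0) := by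
    unfold pvStepA; simp
  have hinv1 : pvInvA (v0 :: rest) 1 (0, v0, v0) := by
    refine ⟨Nat.zero_lt_one, ?_, ⟨0, Nat.zero_lt_one, by simp⟩, ?_,
      ⟨0, le_refl _, by simp⟩, ?_, ?_⟩
    · intro a ha
      have : a = 0 := by omega
      subst this; simp
    · intro a ha
      have : a = 0 := by omega
      subst this; simp
    · intro j hj1 hj2; omega
    · intro k hk1 hk2; omega
  have hrange : List.range (v0 :: rest).length
      = 0 :: List.range' 1 ((v0 :: rest).length - 1) := by
    rw [List.range_eq_range']
    rw [show (v0 :: rest).length = ((v0 :: rest).length - 1) + 1 by omega]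
    rw [List.range'_succ]
    simp
  have hfold : (List.range (v0 :: rest).length).foldl (pvStepA (v0 :: rest)) (0, v0, v0)
      = (List.range' 1 ((v0 :: rest).length - 1)).foldl (pvStepA (v0 :: rest)) (0, v0, v0) := by
    rw [hrange, List.foldl_cons, hst1]
  have hinvN := pvFoldA_inv (v0 :: rest) ((v0 :: rest).length - 1) 1 (0, v0, v0) (by omega) hinv1
  rw [← hfold] at hinvN
  set st := (List.range (v0 :: rest).length).foldl (pvStepA (v0 :: rest)) (0, v0, v0) with hstdef
  obtain ⟨hlt, hmax, _, hvle, ⟨a1, ha1, ha1e⟩, hafter, hbadw⟩ := hinvN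
  refine ⟨st.1 + 1, ?_, by omega, by omega, ?_, ?_⟩
  · show Int.ofNat st.1 + 1 = Int.ofNat (st.1 + 1)
    rfl
  · intro a b ha hb1 hb2
    exact le_trans (hvle a (by omega)) (hafter b (by omega) hb2)
  · intro k hk1 hk2 hg
    obtain ⟨i, j, hik, hkj, hjm, hlt2⟩ := hbadw k hk1 (by omega)
    exact absurd (hg i j hik hkj hjm) (not_le.mpr hlt2)

-- ===== VERDICT (by name: the statement is the Claim_ definition above) =====
theorem partitionDisjoint_spec : Claim_equal_partitionDisjoint := by
  unfold Claim_equal_partitionDisjoint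
  intro nums _ hpre
  unfold Spec_partitionDisjoint
  obtain ⟨K1, hA, hK1a, _, hg1, hb1⟩ := pvA_char nums hpre
  obtain ⟨K2, hB, hK2a, _, hg2, hb2⟩ := pvB_char nums hpre
  have hK : K1 = K2 := by
    rcases lt_trichotomy K1 K2 with h | h | h
    · exact absurd hg1 (hb2 K1 hK1a h)
    · exact h
    · exact absurd hg2 (hb1 K2 hK2a h)
  rw [hA, hB, hK]
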